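-- pv_equiv track=rewrite | github.com/mathensley/Algoritmos_Python | bruteforce/sequencia_numeros.py | sub_num
-- ===== SOURCE A (Python) =====
-- def sub_num(numbers):
--     n = len(numbers)
--     max_seq = 0
--     for i in range(n):
--         atual = numbers[i]
--         count = 1
--         for j in range(i+1, n):
--             if (numbers[i] < numbers[j]
--                 and atual < numbers[j]):
--                     atual = numbers[j]
--                     count += 1
--         if max_seq < count:
--             max_seq = count
--     return max_seq
-- ===== SOURCE B (Python) =====
-- def sub_num(numbers):
--     # O(n): scan right-to-left with a monotonic stack of (value, chain length).
--     best = 0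
--     stack = []
--     for x in reversed(numbers):
--         while stack and stack[-1][0] <= x:
--             stack.pop()
--         g = 1 + (stack[-1][1] if stack else 0)
--         stack.append((x, g))
--         if g > best:
--             best = g
--     return best
-- ===== Notes on version B (the rewrite author's own statement) =====
-- stated objective: faster
-- what changed: replaced the quadratic per-start greedy rescans by a single right-to-left pass with a monotonic stack that stores each value together with its greedy-chain (next-greater) length
import Mathlib
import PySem

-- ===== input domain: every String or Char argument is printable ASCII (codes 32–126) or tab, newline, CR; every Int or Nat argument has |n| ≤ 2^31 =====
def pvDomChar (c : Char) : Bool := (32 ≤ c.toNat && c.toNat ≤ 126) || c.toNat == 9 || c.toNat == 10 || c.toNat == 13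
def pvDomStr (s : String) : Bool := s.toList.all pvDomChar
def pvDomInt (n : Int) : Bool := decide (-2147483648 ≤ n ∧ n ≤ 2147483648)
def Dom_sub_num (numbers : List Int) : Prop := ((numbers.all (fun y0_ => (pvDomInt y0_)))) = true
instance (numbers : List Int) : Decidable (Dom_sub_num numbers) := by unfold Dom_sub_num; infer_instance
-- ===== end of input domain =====

-- B replaces A's quadratic per-start greedy rescans by one right-to-left monotonic-stack pass (objective: faster).

-- ===== PORT A =====
-- literal port of A: for each i, greedily rescan the tail; keep the best count
def sub_num (numbers : List Int) : Int :=
  let n : Int := numbers.length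
  (PySem.List.pyRange 0 n 1).foldl
    (fun max_seq i =>
      let atual := PySem.List.pyGetD numbers i 0
      let s :=
        (PySem.List.pyRange (i + 1) n 1).foldl
          (fun (s : Int × Int) j =>
            if PySem.List.pyGetD numbers i 0 < PySem.List.pyGetD numbers j 0 ∧
               s.1 < PySem.List.pyGetD numbers j 0 then
              (PySem.List.pyGetD numbers j 0, s.2 + 1)
            else s)
          (atual, 1)
      if max_seq < s.2 then s.2 else max_seq)
    0

-- ===== PORT B =====
-- the `while stack and stack[-1][0] <= x: stack.pop()` loop (stack top = list head)
def popLE (x : Int) : List (Int × Int) → List (Int × Int)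
  | [] => []
  | p :: rest => if p.1 ≤ x then popLE x rest else p :: rest

def sub_num_alt (numbers : List Int) : Int :=
  (numbers.reverse.foldl
    (fun (st : List (Int × Int) × Int) x =>
      let stack := popLE x st.1
      let g : Int := 1 + (match stack with | [] => 0 | p :: _ => p.2)
      ((x, g) :: stack, if st.2 < g then g else st.2))
    ([], 0)).2

-- ===== PRECONDITION & SPEC =====
def Spec_sub_num (numbers : List Int) (out : Int) : Prop := out = sub_num_alt numbers
instance (numbers : List Int) (out : Int) : Decidable (Spec_sub_num numbers out) := by unfold Spec_sub_num; infer_instance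

-- ===== CLAIM (what is proved, stated in full; the proofs are below) =====
def Claim_equal_sub_num : Prop := ∀ (numbers : List Int), Dom_sub_num numbers → Spec_sub_num numbers (sub_num numbers)

-- ===== LEMMAS AND PROOFS =====

-- the strict-records (greedy increasing) chain of a list
def chain : List Int → List Int
  | [] => []
  | x :: l => x :: chain (l.dropWhile (· ≤ x))
termination_by l => l.length
decreasing_by
  have := List.length_dropWhile_le (fun y => decide (y ≤ x)) l
  simp only [List.length_cons]; omega

-- number of greedy records of l strictly above threshold a (A's inner count minus 1)
def cAbove : Int → List Int → Int
  | _, [] => 0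
  | a, y :: t => if a < y then 1 + cAbove y t else cAbove a t

-- annotate a chain with chain lengths from each point (B's stack contents)
def ann : List Int → List (Int × Int)
  | [] => []
  | c :: cs => (c, (cs.length : Int) + 1) :: ann cs

-- best chain length over suffixes, shortest suffix first (B's `best`)
def bestOf : List Int → Int
  | [] => 0
  | x :: l =>
      if bestOf l < ((chain (x :: l)).length : Int)
      then ((chain (x :: l)).length : Int) else bestOf l

-- A's outer loop, structurally
def bestAaux : Int → List Int → Int
  | m, [] => m
  | m, x :: l =>
      bestAaux (if m < 1 + cAbove x l then 1 + cAbove x l else m) l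

theorem chain_nil : chain [] = [] := by rw [chain]

theorem chain_unfold (x : Int) (l : List Int) :
    chain (x :: l) = x :: chain (l.dropWhile (· ≤ x)) := by rw [chain]

theorem dropWhile_dropWhile_le {x y : Int} (h : y ≤ x) (t : List Int) :
    (t.dropWhile (· ≤ y)).dropWhile (· ≤ x) = t.dropWhile (· ≤ x) := by
  induction t with
  | nil => rfl
  | cons z t ih =>
    by_cases hz : z ≤ y
    · simp [hz, le_trans hz h, ih]
    · simp [List.dropWhile_cons, hz]

theorem chain_dropWhile : ∀ (l : List Int) (x : Int),
    chain (l.dropWhile (· ≤ x)) = (chain l).dropWhile (· ≤ x)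
  | [], x => by simp [chain_nil]
  | y :: t, x => by
    by_cases hy : y ≤ x
    · rw [show (y :: t).dropWhile (· ≤ x) = t.dropWhile (· ≤ x) by simp [hy]]
      rw [chain_unfold y t]
      rw [show (y :: chain (t.dropWhile (· ≤ y))).dropWhile (· ≤ x)
            = (chain (t.dropWhile (· ≤ y))).dropWhile (· ≤ x) by simp [hy]]
      rw [← chain_dropWhile (t.dropWhile (· ≤ y)) x, dropWhile_dropWhile_le hy]
    · rw [show (y :: t).dropWhile (· ≤ x) = y :: t by simp [hy]]
      rw [chain_unfold y t]
      simp [hy]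
termination_by l _ => l.length
decreasing_by
  have := List.length_dropWhile_le (fun z => decide (z ≤ y)) t
  simp only [List.length_cons]; omega

theorem chain_cons (x : Int) (l : List Int) :
    chain (x :: l) = x :: (chain l).dropWhile (· ≤ x) := by
  rw [chain_unfold x l, chain_dropWhile]

theorem cAbove_eq : ∀ (l : List Int) (x : Int),
    cAbove x l = ((chain (l.dropWhile (· ≤ x))).length : Int)
  | [], x => by simp [chain_nil, cAbove]
  | y :: t, x => by
    by_cases hy : x < y
    · have hny : ¬ y ≤ x := not_le.mpr hy
      rw [show (y :: t).dropWhile (· ≤ x) = y :: t by simp [hny]]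
      rw [chain_unfold y t]
      rw [show cAbove x (y :: t) = 1 + cAbove y t by simp [cAbove, hy]]
      rw [cAbove_eq t y]
      simp only [List.length_cons]; push_cast; ring
    · have hle : y ≤ x := not_lt.mp hy
      rw [show (y :: t).dropWhile (· ≤ x) = t.dropWhile (· ≤ x) by simp [hle]]
      rw [show cAbove x (y :: t) = cAbove x t by simp [cAbove, hy]]
      exact cAbove_eq t x

theorem chain_length_cons (x : Int) (l : List Int) :
    ((chain (x :: l)).length : Int) = 1 + cAbove x l := by
  rw [cAbove_eq l x, chain_unfold x l]
  simp only [List.length_cons]; push_cast; ring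

-- A's inner fold computes the greedy record count above the threshold
theorem innerA (l : List Int) : ∀ (x a c : Int), x ≤ a →
    (l.foldl (fun (s : Int × Int) y =>
        if x < y ∧ s.1 < y then (y, s.2 + 1) else s) (a, c)).2 = c + cAbove a l := by
  induction l with
  | nil => intro x a c _; simp [cAbove]
  | cons y t ih =>
    intro x a c hxa
    simp only [List.foldl_cons]
    by_cases hay : a < y
    · have hxy : x < y := lt_of_le_of_lt hxa hay
      rw [show (if x < y ∧ ((a, c) : Int × Int).1 < y
            then ((y : Int), ((a, c) : Int × Int).2 + 1) else (a, c)) = (y, c + 1)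
          from if_pos (And.intro hxy hay)]
      rw [ih x y (c + 1) (le_of_lt hxy)]
      simp only [cAbove, if_pos hay]; ring
    · have hcond : ¬ (x < y ∧ ((a, c) : Int × Int).1 < y) := fun h => hay h.2
      rw [if_neg hcond, ih x a c hxa]
      simp only [cAbove, if_neg hay]

theorem bestOf_nonneg : ∀ (l : List Int), 0 ≤ bestOf l
  | [] => le_refl 0
  | x :: l => by
    have hb := bestOf_nonneg l
    have h0 : (0 : Int) ≤ ((chain (x :: l)).length : Int) := Int.natCast_nonneg _
    simp only [bestOf]; split_ifs <;> omega

theorem bestAaux_eq : ∀ (l : List Int) (m : Int), 0 ≤ m →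
    bestAaux m l = if m < bestOf l then bestOf l else m
  | [], m, hm => by simp only [bestAaux, bestOf]; split_ifs <;> omega
  | x :: l, m, hm => by
    simp only [bestAaux, bestOf]
    have hc := chain_length_cons x l
    have hb := bestOf_nonneg l
    rw [bestAaux_eq l _ (by split_ifs with h <;> omega)]
    split_ifs <;> omega

-- A's outer loop over indices equals bestAaux on the dropped suffix
theorem outerA (numbers : List Int) : ∀ (k : Nat), k ≤ numbers.length → ∀ (m : Int),
    (PySem.List.pyRange (k : Int) (numbers.length : Int) 1).foldl
      (fun max_seq i =>
        if max_seq <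
            ((PySem.List.pyRange (i + 1) (numbers.length : Int) 1).foldl
              (fun (s : Int × Int) j =>
                if PySem.List.pyGetD numbers i 0 < PySem.List.pyGetD numbers j 0 ∧
                   s.1 < PySem.List.pyGetD numbers j 0 then
                  (PySem.List.pyGetD numbers j 0, s.2 + 1)
                else s)
              (PySem.List.pyGetD numbers i 0, 1)).2 then
          ((PySem.List.pyRange (i + 1) (numbers.length : Int) 1).foldl
              (fun (s : Int × Int) j =>
                if PySem.List.pyGetD numbers i 0 < PySem.List.pyGetD numbers j 0 ∧
                   s.1 < PySem.List.pyGetD numbers j 0 then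
                  (PySem.List.pyGetD numbers j 0, s.2 + 1)
                else s)
              (PySem.List.pyGetD numbers i 0, 1)).2
        else max_seq) m
    = bestAaux m (numbers.drop k)
  | k, hk, m => by
    rcases eq_or_lt_of_le hk with heq | hlt
    · rw [PySem.List.pyRange_one_eq_nil (by exact_mod_cast le_of_eq heq.symm)]
      rw [List.drop_of_length_le (le_of_eq heq.symm)]
      rfl
    · rw [PySem.List.pyRange_one_cons (by exact_mod_cast hlt)]
      rw [List.foldl_cons]
      have hget : PySem.List.pyGetD numbers (k : Int) 0 = numbers[k] := by
        rw [PySem.List.pyGetD_natCast]; exact List.getD_eq_getElem numbers 0 hlt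
      have hinner :
          (PySem.List.pyRange ((k : Int) + 1) (numbers.length : Int) 1).foldl
            (fun (s : Int × Int) j =>
              if PySem.List.pyGetD numbers (k : Int) 0 < PySem.List.pyGetD numbers j 0 ∧
                 s.1 < PySem.List.pyGetD numbers j 0 then
                (PySem.List.pyGetD numbers j 0, s.2 + 1)
              else s)
            (PySem.List.pyGetD numbers (k : Int) 0, 1)
          = (numbers.drop (k + 1)).foldl
              (fun (s : Int × Int) y =>
                if numbers[k] < y ∧ s.1 < y then (y, s.2 + 1) else s)
              (numbers[k], 1) := by
        rw [hget]
        have h0 : (0 : Int) ≤ (k : Int) + 1 := by positivity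
        have := PySem.List.foldl_pyRange_pyGetD (xs := numbers) (a := (k : Int) + 1)
          (d := 0) (f := fun (s : Int × Int) y =>
            if numbers[k] < y ∧ s.1 < y then (y, s.2 + 1) else s)
          (init := (numbers[k], 1)) h0
        rw [show ((k : Int) + 1).toNat = k + 1 by omega] at this
        exact this
      rw [hinner]
      rw [innerA (numbers.drop (k + 1)) numbers[k] numbers[k] 1 (le_refl _)]
      rw [show ((k : Int) + 1) = ((k + 1 : Nat) : Int) by push_cast; ring]
      rw [outerA numbers (k + 1) hlt]
      rw [List.drop_eq_getElem_cons hlt]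
      rfl
  termination_by k _ _ => numbers.length - k

-- B's stack pop on an annotated chain
theorem popLE_ann : ∀ (cs : List Int) (x : Int),
    popLE x (ann cs) = ann (cs.dropWhile (· ≤ x))
  | [], x => rfl
  | c :: cs, x => by
    by_cases h : c ≤ x
    · simp [ann, popLE, h, popLE_ann cs x]
    · simp [ann, popLE, h]

-- B's loop invariant: stack = annotated chain of the processed suffix, best = bestOf
theorem invB : ∀ (l : List Int),
    l.reverse.foldl
      (fun (st : List (Int × Int) × Int) x =>
        let stack := popLE x st.1
        let g : Int := 1 + (match stack with | [] => 0 | p :: _ => p.2)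
        ((x, g) :: stack, if st.2 < g then g else st.2))
      ([], 0)
    = (ann (chain l), bestOf l)
  | [] => by rw [chain_nil]; rfl
  | x :: l => by
    rw [List.reverse_cons, List.foldl_append, invB l]
    simp only [List.foldl_cons, List.foldl_nil]
    rw [popLE_ann (chain l) x]
    have htop : (1 : Int) + (match ann ((chain l).dropWhile (· ≤ x)) with
        | [] => 0 | p :: _ => p.2)
        = (((chain l).dropWhile (· ≤ x)).length : Int) + 1 := by
      cases h : (chain l).dropWhile (· ≤ x) with
      | nil => simp [ann]
      | cons c cs => simp [ann]; ring
    rw [htop]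
    simp only [bestOf]
    rw [chain_cons x l]
    simp only [ann, List.length_cons]
    push_cast
    constructor

theorem sub_num_alt_eq (numbers : List Int) : sub_num_alt numbers = bestOf numbers := by
  unfold sub_num_alt
  rw [invB numbers]

theorem sub_num_eq (numbers : List Int) : sub_num numbers = bestOf numbers := by
  unfold sub_num
  dsimp only
  have h := outerA numbers 0 (Nat.zero_le _) 0
  rw [Nat.cast_zero] at h
  rw [h, List.drop_zero, bestAaux_eq numbers 0 (le_refl 0)]
  have := bestOf_nonneg numbers
  split_ifs <;> omega

-- ===== VERDICT (by name: the statement is the Claim_ definition above) =====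
theorem sub_num_spec : Claim_equal_sub_num := by
  intro numbers _
  show sub_num numbers = sub_num_alt numbers
  rw [sub_num_eq, sub_num_alt_eq]
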